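-- pv_equiv track=rewrite | github.com/ds-sec162/xssforge | xssforge/waf/evasion.py | octal_escape
-- ===== SOURCE A (Python) =====
-- def octal_escape(payload: str) -> str:
--     """Replace key characters with octal escapes."""
--     replacements = {
--         'a': '\\141',
--         'l': '\\154',
--         'e': '\\145',
--         'r': '\\162',
--         't': '\\164',
--     }
--     result = payload
--     for orig, repl in replacements.items():
--         result = result.replace(orig, repl)
--     return result
-- ===== SOURCE B (Python) =====
-- def octal_escape(payload: str) -> str:
--     """Replace key characters with octal escapes, in a single pass."""
--     table = {
--         'a': '\\141',
--         'l': '\\154',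
--         'e': '\\145',
--         'r': '\\162',
--         't': '\\164',
--     }
--     return ''.join(table.get(c, c) for c in payload)
-- ===== Notes on version B (the rewrite author's own statement) =====
-- stated objective: idiomatic
-- what changed: B makes one pass over the characters, joining each character's mapped octal escape (or the character itself), instead of A's five sequential full-string replace passes; the escapes contain no target letters, so no re-replacement can occur and the results coincide.
import Mathlib
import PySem

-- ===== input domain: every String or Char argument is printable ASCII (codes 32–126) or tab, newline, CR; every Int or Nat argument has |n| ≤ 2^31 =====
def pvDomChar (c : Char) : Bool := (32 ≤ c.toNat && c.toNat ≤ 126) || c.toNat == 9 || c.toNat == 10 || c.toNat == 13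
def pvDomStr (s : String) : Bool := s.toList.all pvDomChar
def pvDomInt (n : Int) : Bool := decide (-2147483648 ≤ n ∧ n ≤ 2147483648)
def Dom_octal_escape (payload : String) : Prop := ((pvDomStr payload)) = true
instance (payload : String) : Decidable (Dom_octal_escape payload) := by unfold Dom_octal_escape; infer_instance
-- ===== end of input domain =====

-- B replaces A's five sequential full-string replace passes by a single pass that joins,
-- per character, its octal escape from a lookup table (or the character itself); the escapes
-- contain no target letters, so the two computations agree on every input.

-- ===== PORT A =====
-- A: result = payload; for (orig, repl) in the dict's items: result = result.replace(orig, repl)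
def octal_escape (payload : String) : String :=
  let replacements : PySem.Dict String String :=
    PySem.Dict.ofList [("a", "\\141"), ("l", "\\154"), ("e", "\\145"), ("r", "\\162"), ("t", "\\164")]
  replacements.items.foldl (fun result p => PySem.Str.replace result p.1 p.2) payload

-- ===== PORT B =====
-- B: ''.join(table.get(c, c) for c in payload)
def pvTableB : PySem.Dict String String :=
  PySem.Dict.ofList [("a", "\\141"), ("l", "\\154"), ("e", "\\145"), ("r", "\\162"), ("t", "\\164")]

def octal_escape_alt (payload : String) : String :=
  PySem.Str.join "" (payload.toList.map (fun c =>
    PySem.Dict.getD pvTableB (String.ofList [c]) (String.ofList [c])))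

-- ===== PRECONDITION & SPEC =====
def Spec_octal_escape (payload : String) (out : String) : Prop := out = octal_escape_alt payload
instance (payload : String) (out : String) : Decidable (Spec_octal_escape payload out) := by unfold Spec_octal_escape; infer_instance

-- ===== CLAIM (what is proved, stated in full; the proofs are below) =====
def Claim_equal_octal_escape : Prop := ∀ (payload : String), Dom_octal_escape payload → Spec_octal_escape payload (octal_escape payload)

-- ===== LEMMAS AND PROOFS =====

-- single-character substitution: what one replace pass does per character
def subC (o : Char) (new : List Char) (c : Char) : List Char := if c = o then new else [c]

theorem go_single (o : Char) (new : List Char) : ∀ (fuel : Nat) (s acc : List Char), s.length ≤ fuel →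
    PySem.Chars.replace.go [o] new fuel s acc = acc.reverse ++ s.flatMap (subC o new) := by
  intro fuel
  induction fuel with
  | zero => intro s acc h; cases s <;> simp_all [PySem.Chars.replace.go]
  | succ n ih =>
    intro s acc h
    cases s with
    | nil => simp [PySem.Chars.replace.go]
    | cons c t =>
      rw [PySem.Chars.replace.go]
      by_cases hc : c = o
      · simp [hc, List.isPrefixOf, ih t _ (by simpa using h), subC]
      · have : List.isPrefixOf [o] (c :: t) = false := by
          simp [List.isPrefixOf]; exact fun h => absurd h.symm hc
        simp [this, ih t _ (by simpa using h), subC, hc]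

theorem replace_single (s : List Char) (o : Char) (new : List Char) :
    PySem.Chars.replace s [o] new = s.flatMap (subC o new) := by
  rw [PySem.Chars.replace]
  simp [go_single o new s.length s [] (le_refl _)]

theorem join_nil_flatten (l : List (List Char)) : PySem.Chars.join [] l = l.flatten := by
  induction l with
  | nil => rfl
  | cons h t ih =>
    cases t with
    | nil => simp [PySem.Chars.join, List.intercalate]
    | cons h2 t2 =>
      have : ([] : List Char).intercalate (h :: h2 :: t2) = h ++ [].intercalate (h2 :: t2) := by
        simp [List.intercalate]
      simpa [PySem.Chars.join, this] using ih

theorem beq_lit (d : Char) (s : String) (hs : s = String.ofList [d]) (c : Char) (h : ¬ c = d) :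
    (s == String.ofList [c]) = false := by
  subst hs
  simp [beq_eq_false_iff_ne]
  intro hh
  have := congrArg String.toList hh
  simp at this
  exact h this.symm

theorem items_tab : pvTableB.items = [("a", "\\141"), ("l", "\\154"), ("e", "\\145"), ("r", "\\162"), ("t", "\\164")] := by decide

-- the composition of the five per-character substitutions equals B's table lookup
theorem perChar (c : Char) :
    List.flatMap (fun x =>
      List.flatMap (fun x =>
        List.flatMap (fun x => List.flatMap (subC 't' "\\164".toList) (subC 'r' "\\162".toList x))
          (subC 'e' "\\145".toList x))
        (subC 'l' "\\154".toList x))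
      (subC 'a' "\\141".toList c)
    = (PySem.Dict.getD pvTableB (String.ofList [c]) (String.ofList [c])).toList := by
  by_cases ha : c = 'a'
  · subst ha; decide
  by_cases hl : c = 'l'
  · subst hl; decide
  by_cases he : c = 'e'
  · subst he; decide
  by_cases hr : c = 'r'
  · subst hr; decide
  by_cases ht : c = 't'
  · subst ht; decide
  have hrhs : (PySem.Dict.getD pvTableB (String.ofList [c]) (String.ofList [c])).toList = [c] := by
    simp only [PySem.Dict.getD, PySem.Dict.get?, items_tab, List.find?,
      beq_lit 'a' "a" rfl c ha, beq_lit 'l' "l" rfl c hl, beq_lit 'e' "e" rfl c he,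
      beq_lit 'r' "r" rfl c hr, beq_lit 't' "t" rfl c ht]
    simp
  rw [hrhs]
  simp [subC, ha, hl, he, hr, ht]

-- ===== VERDICT (by name: the statement is the Claim_ definition above) =====
theorem octal_escape_spec : Claim_equal_octal_escape := by
  intro payload _
  unfold Spec_octal_escape
  apply String.toList_inj.mp
  have hA : (octal_escape payload).toList =
      ((((payload.toList.flatMap (subC 'a' "\\141".toList)).flatMap (subC 'l' "\\154".toList)).flatMap
        (subC 'e' "\\145".toList)).flatMap (subC 'r' "\\162".toList)).flatMap (subC 't' "\\164".toList) := by
    simp only [octal_escape]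
    have hitems : (PySem.Dict.ofList [("a", "\\141"), ("l", "\\154"), ("e", "\\145"), ("r", "\\162"), ("t", "\\164")] : PySem.Dict String String).items
        = [("a", "\\141"), ("l", "\\154"), ("e", "\\145"), ("r", "\\162"), ("t", "\\164")] := by decide
    rw [hitems]
    simp only [List.foldl, PySem.Str.toList_replace]
    rw [show ("a" : String).toList = ['a'] from rfl, show ("l" : String).toList = ['l'] from rfl,
        show ("e" : String).toList = ['e'] from rfl, show ("r" : String).toList = ['r'] from rfl,
        show ("t" : String).toList = ['t'] from rfl]
    simp only [replace_single]
  have hB : (octal_escape_alt payload).toList =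
      payload.toList.flatMap (fun c => (PySem.Dict.getD pvTableB (String.ofList [c]) (String.ofList [c])).toList) := by
    simp only [octal_escape_alt, PySem.Str.toList_join]
    rw [show ("" : String).toList = [] from rfl]
    rw [join_nil_flatten]
    simp [List.flatMap_def, Function.comp_def]
  rw [hA, hB]
  simp only [List.flatMap_assoc]
  exact List.flatMap_congr (fun c _ => perChar c)
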